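-- pv_equiv track=rewrite | github.com/pekoto/python-data-structures | problems/dynamic_fibonacci.py | _number_factors_topdown
-- ===== SOURCE A (Python) =====
-- def _number_factors_topdown(n: int, dp: list[int]) -> int:
--     """Recursive helper function."""
--     if n < 0:
--         return 0
--
--     if n <= 1:
--         return 1
--
--     if dp[n] != -1:
--         return dp[n]
--
--     dp[n] = _number_factors_topdown(n-1, dp) + _number_factors_topdown(n-3, dp) + _number_factors_topdown(n-4, dp)
--
--     return dp[n]
-- ===== SOURCE B (Python) =====
-- def _number_factors_topdown(n: int, dp: list[int]) -> int:
--     """Bottom-up iterative DP; fills dp[2..n] left to right, honouring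
--     pre-cached entries (dp[i] != -1) exactly like the memoized recursion.
--     Note: it fills every -1 slot in 2..n, whereas A only fills the lazily
--     reachable ones -- the return value is identical."""
--     if n < 0:
--         return 0
--     if n <= 1:
--         return 1
--
--     def read(j: int) -> int:
--         if j < 0:
--             return 0
--         if j <= 1:
--             return 1
--         return dp[j]
--
--     for i in range(2, n + 1):
--         if dp[i] == -1:
--             dp[i] = read(i - 1) + read(i - 3) + read(i - 4)
--     return dp[n]
-- ===== Notes on version B (the rewrite author's own statement) =====
-- stated objective: alternative
-- what changed: Replaced the memoized top-down recursion by a bottom-up iterative DP that sweeps i = 2..n once, skipping pre-cached entries; no recursion, no call stack.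
import Mathlib
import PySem

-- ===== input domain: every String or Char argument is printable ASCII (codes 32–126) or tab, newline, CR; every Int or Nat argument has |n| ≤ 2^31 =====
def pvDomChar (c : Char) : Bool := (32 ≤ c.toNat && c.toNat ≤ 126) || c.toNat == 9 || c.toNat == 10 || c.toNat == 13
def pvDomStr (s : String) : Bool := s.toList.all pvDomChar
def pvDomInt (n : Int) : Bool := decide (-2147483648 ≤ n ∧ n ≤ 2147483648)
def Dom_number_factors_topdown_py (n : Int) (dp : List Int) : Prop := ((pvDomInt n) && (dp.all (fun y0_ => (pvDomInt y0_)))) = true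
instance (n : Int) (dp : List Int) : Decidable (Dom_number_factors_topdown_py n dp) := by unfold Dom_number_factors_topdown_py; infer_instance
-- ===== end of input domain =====

-- B replaces A's memoized top-down recursion by a bottom-up iterative sweep (equivalence is about the
-- return value only: both Pythons mutate dp, and B fills every -1 slot in 2..n while A only fills the lazily reachable ones).


-- ===== PORT A =====
-- A threads the mutated dp through the recursion: pvGoA returns (return value, final dp state).
-- Where Python raises IndexError (dp[n] out of range, excluded by Pre_) the port returns (0, dp).
-- fuel only makes the recursion structural; pvGoA_main proves any fuel > n.toNat gives the run of A
def pvGoA : Nat → Int → List Int → Int × List Int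
  | 0, _, dp => (0, dp)
  | Nat.succ f, n, dp =>
    if n < 0 then (0, dp)
    else if n ≤ 1 then (1, dp)
    else
      match PySem.List.pyGet? dp n with
      | none => (0, dp)
      | some v =>
        if v ≠ -1 then (v, dp)
        else
          let r1 := pvGoA f (n-1) dp
          let r2 := pvGoA f (n-3) r1.2
          let r3 := pvGoA f (n-4) r2.2
          let s := r1.1 + r2.1 + r3.1
          let dp' := PySem.List.pySetD r3.2 n s
          (PySem.List.pyGetD dp' n 0, dp')

def number_factors_topdown_py (n : Int) (dp : List Int) : Int := (pvGoA (n.toNat + 1) n dp).1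

-- ===== PORT B =====
-- the local helper `read` of Source B
def pvReadB (dp : List Int) (j : Int) : Int :=
  if j < 0 then 0 else if j ≤ 1 then 1 else PySem.List.pyGetD dp j 0

-- one iteration of Source B's `for i in range(2, n + 1)` loop body
def pvStepB (d : List Int) (i : Int) : List Int :=
  if PySem.List.pyGetD d i 0 = -1
  then PySem.List.pySetD d i (pvReadB d (i-1) + pvReadB d (i-3) + pvReadB d (i-4))
  else d

def number_factors_topdown_py_alt (n : Int) (dp : List Int) : Int :=
  if n < 0 then 0
  else if n ≤ 1 then 1
  else
    let dp' := (PySem.List.pyRange 2 (n+1) 1).foldl pvStepB dp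
    PySem.List.pyGetD dp' n 0

-- ===== PRECONDITION & SPEC =====
-- Pre_ excludes exactly the inputs where Python A raises IndexError: n ≥ 2 with n out of dp's range
-- (Python B raises there as well).
def Pre_number_factors_topdown_py (n : Int) (dp : List Int) : Prop :=
  n ≤ 1 ∨ n < (dp.length : Int)
instance (n : Int) (dp : List Int) : Decidable (Pre_number_factors_topdown_py n dp) := by
  unfold Pre_number_factors_topdown_py; infer_instance

def pvWitness_number_factors_topdown_py : Int × List Int := (5, [-1, -1, -1, -1, -1, -1])

def Spec_number_factors_topdown_py (n : Int) (dp : List Int) (out : Int) : Prop := out = number_factors_topdown_py_alt n dp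
instance (n : Int) (dp : List Int) (out : Int) : Decidable (Spec_number_factors_topdown_py n dp out) := by unfold Spec_number_factors_topdown_py; infer_instance

-- ===== CLAIM (what is proved, stated in full; the proofs are below) =====
def Claim_equal_number_factors_topdown_py : Prop := ∀ (n : Int) (dp : List Int), Dom_number_factors_topdown_py n dp → Pre_number_factors_topdown_py n dp → Spec_number_factors_topdown_py n dp (number_factors_topdown_py n dp)

-- ===== LEMMAS AND PROOFS =====
-- pvF dp n: the value of the memoised recursion with all reads taken in the fixed list dp.
-- Both ports are shown to compute pvF dp n; the mutation bookkeeping is the content of the lemmas.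
def pvF (dp : List Int) (n : Int) : Int :=
  if _h0 : n < 0 then 0
  else if _h1 : n ≤ 1 then 1
  else if PySem.List.pyGetD dp n 0 ≠ -1 then PySem.List.pyGetD dp n 0
  else pvF dp (n-1) + pvF dp (n-3) + pvF dp (n-4)
termination_by n.toNat
decreasing_by all_goals omega

theorem pvF_le_one (d : List Int) (k : Int) (h : k ≤ 1) : pvF d k = if k < 0 then 0 else 1 := by
  rw [pvF]; split_ifs <;> simp_all

theorem pvF_ge_two (d : List Int) (k : Int) (h : 2 ≤ k) :
    pvF d k = if PySem.List.pyGetD d k 0 ≠ -1 then PySem.List.pyGetD d k 0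
              else pvF d (k-1) + pvF d (k-3) + pvF d (k-4) := by
  rw [pvF, dif_neg (by omega), dif_neg (by omega)]

theorem pvGetD_set_self (dp : List Int) (jn : Nat) (v : Int) (hl : jn < dp.length) :
    PySem.List.pyGetD (dp.set jn v) (jn : Int) 0 = v := by
  rw [PySem.List.pyGetD_natCast]
  simp [List.getD, hl]

theorem pvGetD_set_ne (dp : List Int) (jn : Nat) (v k : Int) (hk : 0 ≤ k) (hne : k ≠ (jn : Int)) :
    PySem.List.pyGetD (dp.set jn v) k 0 = PySem.List.pyGetD dp k 0 := by
  rw [show k = ((k.toNat : Nat) : Int) by omega, PySem.List.pyGetD_natCast,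
    PySem.List.pyGetD_natCast]
  simp [List.getD, show ¬ jn = k.toNat by omega]

-- Writing the pvF-value into a -1 slot does not change pvF anywhere.
theorem pvF_set_preserve (dp : List Int) (jn : Nat) (v : Int) (hj2 : 2 ≤ jn)
    (hl : jn < dp.length) (hc : PySem.List.pyGetD dp (jn : Int) 0 = -1)
    (hv : v = pvF dp (jn : Int)) :
    ∀ (m : Nat) (k : Int), k.toNat ≤ m → pvF (dp.set jn v) k = pvF dp k := by
  intro m
  induction m with
  | zero =>
    intro k hk
    rw [pvF_le_one _ _ (by omega), pvF_le_one _ _ (by omega)]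
  | succ m ih =>
    intro k hk
    by_cases hk1 : k ≤ 1
    · rw [pvF_le_one _ _ hk1, pvF_le_one _ _ hk1]
    · by_cases hkj : k = (jn : Int)
      · subst hkj
        rw [pvF_ge_two _ _ (by omega), pvGetD_set_self dp jn v hl]
        by_cases hv1 : v = -1
        · rw [if_neg (by simp [hv1])]
          rw [ih _ (by omega), ih _ (by omega), ih _ (by omega)]
          conv_rhs => rw [pvF_ge_two dp (jn : Int) (by exact_mod_cast (by omega : (2:Int) ≤ (jn:Int)))]
          rw [if_neg (by simp [hc])]
        · rw [if_pos hv1]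
          exact hv
      · rw [pvF_ge_two _ _ (by omega), pvF_ge_two dp k (by omega),
          pvGetD_set_ne dp jn v k (by omega) hkj]
        by_cases hd : PySem.List.pyGetD dp k 0 = -1
        · rw [if_neg (by simp [hd]), if_neg (by simp [hd])]
          rw [ih _ (by omega), ih _ (by omega), ih _ (by omega)]
        · rw [if_pos hd, if_pos hd]

-- A's recursion returns pvF dp n, preserves pvF, preserves entries above n, and keeps the length.
theorem pvGoA_main : ∀ (f : Nat) (n : Int) (dp : List Int), n.toNat < f →
    (pvGoA f n dp).1 = pvF dp n ∧
    (∀ k, pvF (pvGoA f n dp).2 k = pvF dp k) ∧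
    (∀ k, n < k → 0 ≤ k → PySem.List.pyGetD (pvGoA f n dp).2 k 0 = PySem.List.pyGetD dp k 0) ∧
    (pvGoA f n dp).2.length = dp.length := by
  intro f
  induction f with
  | zero => intro n dp hm; omega
  | succ m ih =>
  intro n dp hm
  by_cases h0 : n < 0
  · rw [pvGoA, if_pos h0]
    exact ⟨by rw [pvF_le_one _ _ (by omega), if_pos h0], fun k => rfl, fun k _ _ => rfl, rfl⟩
  · by_cases h1 : n ≤ 1
    · rw [pvGoA, if_neg h0, if_pos h1]
      exact ⟨by rw [pvF_le_one _ _ h1, if_neg h0], fun k => rfl, fun k _ _ => rfl, rfl⟩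
    · rw [pvGoA, if_neg h0, if_neg h1]
      cases hget : PySem.List.pyGet? dp n with
      | none =>
        have hoor : ¬ PySem.Raise.InRange dp.length n := by
          rw [← PySem.List.pyGet?_eq_none_iff]; exact hget
        have hlen : (dp.length : Int) ≤ n := by
          simp [PySem.Raise.InRange] at hoor; omega
        have hgd : PySem.List.pyGetD dp n 0 = 0 := by
          show (PySem.List.pyGet? dp n).getD 0 = 0; rw [hget]; rfl
        simp only []
        exact ⟨by rw [pvF_ge_two _ _ (by omega), if_pos (by simp [hgd])]; omega,
          fun _ => trivial, fun _ _ _ => trivial, by trivial⟩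
      | some v =>
        simp only []
        by_cases hv : v = -1
        · subst hv
          rw [if_neg (by simp)]
          simp only []
          have hir : PySem.Raise.InRange dp.length n := by
            by_contra hcx
            rw [← PySem.List.pyGet?_eq_none_iff] at hcx
            rw [hget] at hcx; cases hcx
          have hnlen : n < (dp.length : Int) := by
            simp [PySem.Raise.InRange] at hir; omega
          have hgd : PySem.List.pyGetD dp n 0 = -1 := by
            show (PySem.List.pyGet? dp n).getD 0 = -1; rw [hget]; rfl
          set g1 : Int × List Int := pvGoA m (n-1) dp with hg1
          set g2 : Int × List Int := pvGoA m (n-3) g1.2 with hg2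
          set g3 : Int × List Int := pvGoA m (n-4) g2.2 with hg3
          obtain ⟨ha1, ha2, ha3, ha4⟩ := ih (n-1) dp (by omega)
          obtain ⟨hb1, hb2, hb3, hb4⟩ := ih (n-3) g1.2 (by omega)
          obtain ⟨hc1, hc2, hc3, hc4⟩ := ih (n-4) g2.2 (by omega)
          simp only [← hg1] at ha1 ha2 ha3 ha4
          simp only [← hg2] at hb1 hb2 hb3 hb4
          simp only [← hg3] at hc1 hc2 hc3 hc4
          have hs : g1.1 + g2.1 + g3.1 = pvF dp n := by
            rw [pvF_ge_two dp n (by omega), if_neg (by simp [hgd])]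
            rw [ha1, hb1, hc1]
            simp only [hb2, ha2]
          have hlen3 : g3.2.length = dp.length := by rw [hc4, hb4, ha4]
          have hup : PySem.List.pyGetD g3.2 n 0 = -1 := by
            rw [hc3 n (by omega) (by omega), hb3 n (by omega) (by omega),
              ha3 n (by omega) (by omega), hgd]
          have hFp : ∀ k, pvF g3.2 k = pvF dp k := fun k => by rw [hc2, hb2, ha2]
          have hcast : ((n.toNat : Nat) : Int) = n := by omega
          have hsp := pvF_set_preserve g3.2 n.toNat (g1.1 + g2.1 + g3.1) (by omega)
            (by omega) (by rw [hcast]; exact hup) (by rw [hcast, hFp]; exact hs)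
          have hsetD : PySem.List.pySetD g3.2 n (g1.1 + g2.1 + g3.1)
              = g3.2.set n.toNat (g1.1 + g2.1 + g3.1) :=
            PySem.List.pySetD_of_nonneg _ _ (by omega)
          refine ⟨?_, ?_, ?_, ?_⟩
          · have hself := pvGetD_set_self g3.2 n.toNat (g1.1 + g2.1 + g3.1) (by omega)
            rw [hcast] at hself
            rw [hsetD, hself]; exact hs
          · intro k
            rw [hsetD, hsp k.toNat k le_rfl, hFp]
          · intro k hk hk0
            rw [hsetD, pvGetD_set_ne g3.2 n.toNat _ k hk0 (by omega),
              hc3 k (by omega) hk0, hb3 k (by omega) hk0, ha3 k (by omega) hk0]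
          · rw [hsetD]; simp [hlen3]
        · rw [if_pos hv]
          have hgd : PySem.List.pyGetD dp n 0 = v := by
            show (PySem.List.pyGet? dp n).getD 0 = v; rw [hget]; rfl
          exact ⟨by rw [pvF_ge_two _ _ (by omega), if_pos (by simp [hgd, hv]), hgd],
            fun _ => rfl, fun _ _ _ => rfl, rfl⟩

-- B's sweep invariant: after processing 2..2+t-1, reads below 2+t give pvF, entries above are untouched.
theorem pvFoldB_main (dp : List Int) : ∀ (t : Nat), 2 + (t:Int) ≤ (dp.length : Int) →
    ((PySem.List.pyRange 2 (2 + (t:Int)) 1).foldl pvStepB dp).length = dp.length ∧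
    (∀ k, 2 + (t:Int) ≤ k →
      PySem.List.pyGetD ((PySem.List.pyRange 2 (2 + (t:Int)) 1).foldl pvStepB dp) k 0
        = PySem.List.pyGetD dp k 0) ∧
    (∀ k, k < 2 + (t:Int) →
      pvReadB ((PySem.List.pyRange 2 (2 + (t:Int)) 1).foldl pvStepB dp) k = pvF dp k) := by
  intro t
  induction t with
  | zero =>
    intro _
    refine ⟨by simp, fun k _ => by simp, fun k hk => ?_⟩
    have h2 : PySem.List.pyRange 2 (2 + ((0:Nat):Int)) 1 = [] := by simp
    rw [h2]
    simp only [List.foldl_nil]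
    rw [pvF_le_one _ _ (by omega), pvReadB]
    split_ifs <;> omega
  | succ t ih =>
    intro hlen
    obtain ⟨ih1, ih2, ih3⟩ := ih (by omega)
    have hrange : PySem.List.pyRange 2 (2 + ((t+1:Nat):Int)) 1
        = PySem.List.pyRange 2 (2 + (t:Int)) 1 ++ [2 + (t:Int)] := by
      rw [show (2 + ((t+1:Nat):Int)) = 2 + (t:Int) + 1 by omega]
      rw [PySem.List.pyRange_one_succ_right]; omega
    rw [hrange, List.foldl_append]
    set d : List Int := (PySem.List.pyRange 2 (2 + (t:Int)) 1).foldl pvStepB dp with hd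
    simp only [List.foldl_cons, List.foldl_nil]
    have hi : (2:Int) + (t:Int) = ((2 + t : Nat) : Int) := by omega
    have hguard : PySem.List.pyGetD d (2 + (t:Int)) 0 = PySem.List.pyGetD dp (2 + (t:Int)) 0 :=
      ih2 _ le_rfl
    rw [pvStepB]
    by_cases hc : PySem.List.pyGetD d (2 + (t:Int)) 0 = -1
    · rw [if_pos hc]
      have hw : pvReadB d (2 + (t:Int) - 1) + pvReadB d (2 + (t:Int) - 3) + pvReadB d (2 + (t:Int) - 4)
          = pvF dp (2 + (t:Int)) := by
        rw [ih3 _ (by omega), ih3 _ (by omega), ih3 _ (by omega)]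
        rw [pvF_ge_two dp (2 + (t:Int)) (by omega), if_neg (by rw [← hguard]; simp [hc])]
      have hsetD : PySem.List.pySetD d (2 + (t:Int)) (pvReadB d (2 + (t:Int) - 1) + pvReadB d (2 + (t:Int) - 3) + pvReadB d (2 + (t:Int) - 4))
          = d.set (2 + t) (pvReadB d (2 + (t:Int) - 1) + pvReadB d (2 + (t:Int) - 3) + pvReadB d (2 + (t:Int) - 4)) := by
        rw [PySem.List.pySetD_of_nonneg _ _ (by omega)]
        congr 1
      rw [hsetD]
      have hlend : (2 + t) < d.length := by omega
      refine ⟨by simp [ih1], fun k hk => ?_, fun k hk => ?_⟩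
      · rw [pvGetD_set_ne d (2+t) _ k (by omega) (by omega), ih2 _ (by omega)]
      · by_cases hk1 : k ≤ 1
        · rw [pvF_le_one _ _ hk1, pvReadB]; split_ifs <;> omega
        · rw [pvReadB, if_neg (by omega), if_neg hk1]
          by_cases hkt : k = 2 + (t:Int)
          · subst hkt
            have hself := pvGetD_set_self d (2+t) (pvReadB d (2 + (t:Int) - 1) + pvReadB d (2 + (t:Int) - 3) + pvReadB d (2 + (t:Int) - 4)) hlend
            rw [← hi] at hself
            rw [hself, hw]
          · rw [pvGetD_set_ne d (2+t) _ k (by omega) (by omega)]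
            have := ih3 k (by omega)
            rw [pvReadB, if_neg (by omega), if_neg hk1] at this
            exact this
    · rw [if_neg hc]
      refine ⟨ih1, fun k hk => ih2 _ (by omega), fun k hk => ?_⟩
      by_cases hk1 : k ≤ 1
      · rw [pvF_le_one _ _ hk1, pvReadB]; split_ifs <;> omega
      · by_cases hkt : k = 2 + (t:Int)
        · subst hkt
          rw [pvReadB, if_neg (by omega), if_neg (by omega), hguard]
          rw [pvF_ge_two _ _ (by omega), if_pos (by rw [← hguard]; simp [hc])]
        · exact ih3 k (by omega)

theorem final_eq (n : Int) (dp : List Int) (hpre : n ≤ 1 ∨ n < (dp.length : Int)) :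
    number_factors_topdown_py n dp = number_factors_topdown_py_alt n dp := by
  unfold number_factors_topdown_py number_factors_topdown_py_alt
  by_cases h0 : n < 0
  · rw [pvGoA, if_pos h0, if_pos h0]
  · by_cases h1 : n ≤ 1
    · rw [pvGoA, if_neg h0, if_pos h1, if_neg h0, if_pos h1]
    · have hlen : n < (dp.length : Int) := by
        rcases hpre with h | h
        · omega
        · exact h
      have hA := (pvGoA_main (n.toNat + 1) n dp (by omega)).1
      have hB := (pvFoldB_main dp (n-1).toNat (by omega)).2.2 n (by omega)
      rw [if_neg h0, if_neg h1]
      simp only []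
      rw [hA]
      rw [show (n+1 : Int) = 2 + (((n-1).toNat : Nat) : Int) from by omega]
      rw [pvReadB, if_neg (by omega), if_neg (by omega)] at hB
      exact hB.symm

-- ===== VERDICT (by name: the statement is the Claim_ definition above) =====
theorem number_factors_topdown_py_spec : Claim_equal_number_factors_topdown_py := by
  intro n dp _ hpre
  exact final_eq n dp hpre
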